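-- pv_equiv track=rewrite | github.com/TuyenH19/holbertonschool-interview | primegame/0-prime_game.py | isWinner
-- ===== SOURCE A (Python) =====
-- def isWinner(x, nums):
--     """
--     Determine the winner of each round of the prime game and
--     return the name of the player with the most total wins.
--
--     Args:
--         x (int): number of rounds
--         nums (List[int]): list of n values per round
--
--     Returns:
--         str or None: "Maria", "Ben", or None if tie/undetermined
--     """
--     # Basic guards
--     if not x or not nums:
--         return None
--
--     # Use only the first x rounds, per problem statement
--     rounds = nums[:x]
--     max_n = 0
--     for n in rounds:
--         if n > max_n:
--             max_n = n
--
--     if max_n < 2: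
--         # No primes in any round; Ben wins all (or tie if all n<2 but x>0)
--         # Evaluate properly to handle possible ties.
--         maria_wins = 0
--         ben_wins = len(rounds)
--         if maria_wins > ben_wins:
--             return "Maria"
--         if ben_wins > maria_wins:
--             return "Ben"
--         return None
--
--     # Sieve of Eratosthenes up to max_n
--     is_prime = [True] * (max_n + 1)
--     is_prime[0] = False
--     if max_n >= 1:
--         is_prime[1] = False
--
--     p = 2
--     while p * p <= max_n:
--         if is_prime[p]:
--             step = p
--             start = p * p
--             for multiple in range(start, max_n + 1, step):
--                 is_prime[multiple] = False
--         p += 1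
--
--     # Prefix count of primes
--     prime_count = [0] * (max_n + 1)
--     running = 0
--     for i in range(2, max_n + 1):
--         if is_prime[i]:
--             running += 1
--         prime_count[i] = running
--
--     # Tally wins
--     maria = 0
--     ben = 0
--     for n in rounds:
--         # If no primes up to n, Ben wins (Maria can't move)
--         if prime_count[n] % 2 == 1:
--             maria += 1
--         else:
--             ben += 1
--
--     if maria > ben:
--         return "Maria"
--     if ben > maria:
--         return "Ben"
--     return None
-- ===== SOURCE B (Python) =====
-- def isWinner(x, nums):
--     """Same result as the original, but primality by trial division
--     (no sieve array) and the tally as a parity sum instead of two counters."""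
--     if not x or not nums:
--         return None
--     rounds = nums[:x]
--     max_n = max(rounds, default=0)
--     if max_n < 2:
--         return "Ben" if rounds else None
--     count = [0, 0]
--     c = 0
--     for i in range(2, max_n + 1):
--         if all(i % d for d in range(2, i) if d * d <= i):
--             c += 1
--         count.append(c)
--     maria = sum(count[n] % 2 for n in rounds)
--     return "Maria" if 2 * maria > len(rounds) else ("Ben" if 2 * maria < len(rounds) else None)
-- ===== Notes on version B (the rewrite author's own statement) =====
-- stated objective: simpler
-- what changed: B drops the Sieve of Eratosthenes and its boolean array in favour of per-number trial division (testing divisors d with d*d <= i), gets the round maximum with the built-in max(..., default=0), grows the prefix-count table by append instead of preallocate-and-set, and tallies with a single parity sum compared against 2*maria instead of two win counters.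
import Mathlib
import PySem

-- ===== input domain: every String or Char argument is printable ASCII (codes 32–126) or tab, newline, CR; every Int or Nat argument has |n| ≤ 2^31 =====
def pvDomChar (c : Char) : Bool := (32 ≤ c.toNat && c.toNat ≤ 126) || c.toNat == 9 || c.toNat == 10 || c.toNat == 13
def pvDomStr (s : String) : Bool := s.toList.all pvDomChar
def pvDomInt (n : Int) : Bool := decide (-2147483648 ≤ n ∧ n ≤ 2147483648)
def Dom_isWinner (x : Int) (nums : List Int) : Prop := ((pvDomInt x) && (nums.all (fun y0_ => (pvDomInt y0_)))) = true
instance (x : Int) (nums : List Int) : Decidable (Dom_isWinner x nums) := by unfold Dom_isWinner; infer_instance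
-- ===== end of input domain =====

-- B replaces A's Sieve of Eratosthenes with per-number trial division and the two
-- win counters with a single parity sum (objective: simpler).

-- ===== PORT A =====
-- inner `for multiple in range(start, max_n+1, step): is_prime[multiple] = False`;
-- the range stop max_n+1 equals bs.length here, and step = p > 0 (the 0 < step
-- test is only a totality guard, Python's step is always ≥ 2).
def pvMarkStep (bs : List Bool) (start step : Nat) : List Bool :=
  if _h : start < bs.length ∧ 0 < step then
    pvMarkStep (bs.set start false) (start + step) step
  else bs
termination_by bs.length - start
decreasing_by simp only [List.length_set]; omega

-- `while p * p <= max_n: if is_prime[p]: …; p += 1` (indices are in range, getD is exact)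
def pvSieveLoop (bs : List Bool) (p M : Nat) : List Bool :=
  if h : p * p ≤ M then
    pvSieveLoop (if bs.getD p false then pvMarkStep bs (p * p) p else bs) (p + 1) M
  else bs
termination_by M + 1 - p
decreasing_by
  rcases Nat.eq_zero_or_pos p with hp | hp
  · omega
  · have : p ≤ p * p := Nat.le_mul_of_pos_left p hp
    omega

def isWinner (x : Int) (nums : List Int) : Option String :=
  if x = 0 ∨ nums = [] then none
  else
    let rounds := PySem.List.slice nums none (some x)      -- nums[:x]
    let max_n : Int := rounds.foldl (fun m n => if n > m then n else m) 0
    if max_n < 2 then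
      let maria_wins : Nat := 0
      let ben_wins := rounds.length
      if maria_wins > ben_wins then some "Maria"
      else if ben_wins > maria_wins then some "Ben"
      else none
    else
      let M := max_n.toNat        -- max_n ≥ 2 in this branch, toNat is exact
      -- is_prime = [True]*(max_n+1); is_prime[0] = False; is_prime[1] = False (max_n ≥ 1 here)
      let bs0 := ((List.replicate (M + 1) true).set 0 false).set 1 false
      let bs := pvSieveLoop bs0 2 M
      -- prefix count: for i in range(2, max_n+1): …  (range(2, M+1) = List.range' 2 (M-1))
      let pc := ((List.range' 2 (M - 1)).foldl
        (fun (st : Nat × List Nat) i =>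
          let running := if bs.getD i false then st.1 + 1 else st.1
          (running, st.2.set i running))
        (0, List.replicate (M + 1) 0)).2
      -- tally; prime_count[n] uses Python indexing (negative n wraps); Pre_ excludes
      -- the IndexError cases, so the getD default 0 is never read off a raise
      let t := rounds.foldl
        (fun (mb : Nat × Nat) n =>
          if PySem.List.pyGetD pc n 0 % 2 = 1 then (mb.1 + 1, mb.2) else (mb.1, mb.2 + 1))
        (0, 0)
      if t.1 > t.2 then some "Maria" else if t.2 > t.1 then some "Ben" else none

-- ===== PORT B =====
-- all(i % d for d in range(2, i) if d * d <= i)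
def pvTrial (i : Nat) : Bool :=
  (((List.range' 2 (i - 2)).filter (fun d => d * d ≤ i)).all (fun d => i % d ≠ 0))

def isWinner_alt (x : Int) (nums : List Int) : Option String :=
  if x = 0 ∨ nums = [] then none
  else
    let rounds := PySem.List.slice nums none (some x)      -- nums[:x]
    let max_n : Int := PySem.List.maxD rounds id 0          -- max(rounds, default=0)
    if max_n < 2 then (if rounds.isEmpty then none else some "Ben")
    else
      let M := max_n.toNat
      -- count = [0, 0]; c = 0; for i in range(2, max_n+1): …; count.append(c)
      let count := ((List.range' 2 (M - 1)).foldl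
        (fun (st : Nat × List Nat) i =>
          let c := if pvTrial i then st.1 + 1 else st.1
          (c, st.2 ++ [c]))
        (0, [0, 0])).2
      -- maria = sum(count[n] % 2 for n in rounds)
      let maria := rounds.foldl (fun s n => s + PySem.List.pyGetD count n 0 % 2) 0
      if 2 * maria > rounds.length then some "Maria"
      else if 2 * maria < rounds.length then some "Ben"
      else none

-- ===== PRECONDITION & SPEC =====
-- Pre_ excludes exactly the inputs where Python A raises IndexError: some round value n
-- is so negative that prime_count[n] is out of range (B raises the same way there).
def Pre_isWinner (x : Int) (nums : List Int) : Prop :=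
  x = 0 ∨ nums = [] ∨
    (let rounds := PySem.List.slice nums none (some x)
     let m := rounds.foldl max 0
     m < 2 ∨ ∀ n ∈ rounds, -(m + 1) ≤ n)
instance (x : Int) (nums : List Int) : Decidable (Pre_isWinner x nums) := by
  unfold Pre_isWinner; infer_instance

def pvWitness_isWinner : Int × List Int := (3, [4, 5, 1])

def Spec_isWinner (x : Int) (nums : List Int) (out : Option String) : Prop := out = isWinner_alt x nums
instance (x : Int) (nums : List Int) (out : Option String) : Decidable (Spec_isWinner x nums out) := by unfold Spec_isWinner; infer_instance

-- ===== CLAIM (what is proved, stated in full; the proofs are below) =====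
def Claim_equal_isWinner : Prop := ∀ (x : Int) (nums : List Int), Dom_isWinner x nums → Pre_isWinner x nums → Spec_isWinner x nums (isWinner x nums)

-- ===== LEMMAS AND PROOFS =====

-- prime count up to j (the common specification of both prefix-count lists)
def pvPi (j : Nat) : Nat := (List.range (j + 1)).countP (fun k => decide (Nat.Prime k))

-- √-bounded trial division characterises primality
theorem pv_prime_iff_sqrt (i : Nat) (h2 : 2 ≤ i) :
    Nat.Prime i ↔ ∀ q, 2 ≤ q → q * q ≤ i → ¬ q ∣ i := by
  rw [Nat.prime_def_le_sqrt]
  constructor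
  · rintro ⟨-, h⟩ q hq hqq
    exact h q hq (Nat.le_sqrt.mpr hqq)
  · intro h
    exact ⟨h2, fun m hm hms => h m hm (Nat.le_sqrt.mp hms)⟩

theorem pvTrial_eq (i : Nat) (h2 : 2 ≤ i) : pvTrial i = decide (Nat.Prime i) := by
  rw [Bool.eq_iff_iff, decide_eq_true_eq, pv_prime_iff_sqrt i h2]
  unfold pvTrial
  simp only [List.all_eq_true, List.mem_filter, List.mem_range'_1, decide_eq_true_eq,
    ne_eq]
  constructor
  · intro h q hq hqq hdvd
    have hql : q < i := by
      have : 2 * q ≤ q * q := Nat.mul_le_mul_right q hq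
      omega
    exact h q ⟨⟨hq, by omega⟩, hqq⟩ ((Nat.dvd_iff_mod_eq_zero.mp hdvd))
  · intro h d hd hmod
    exact h d hd.1.1 hd.2 ((Nat.dvd_iff_mod_eq_zero.mpr hmod))

theorem pvMarkStep_getD (step : Nat) (hstep : 0 < step) (bs : List Bool) (start : Nat) :
    ∀ i, (pvMarkStep bs start step).getD i false =
      if start ≤ i ∧ i < bs.length ∧ step ∣ (i - start) then false else bs.getD i false := by
  refine pvMarkStep.induct step
    (motive := fun bs start => ∀ i, (pvMarkStep bs start step).getD i false =
      if start ≤ i ∧ i < bs.length ∧ step ∣ (i - start) then false else bs.getD i false)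
    ?_ ?_ bs start
  · intro bs start h ih i
    rw [pvMarkStep, dif_pos h, ih i]
    simp only [List.length_set]
    by_cases hi : i = start
    · subst hi
      rw [if_neg (by rintro ⟨h1, -⟩; omega), if_pos ⟨le_refl i, h.1, by simp⟩]
      simp [List.getD_eq_getElem?_getD, List.getElem?_set_self h.1]
    · have hget : (bs.set start false).getD i false = bs.getD i false := by
        simp [List.getD_eq_getElem?_getD, List.getElem?_set_ne (Ne.symm hi)]
      rw [hget]
      congr 1
      simp only [eq_iff_iff]
      constructor
      · rintro ⟨h1, h2, k, hk⟩
        exact ⟨by omega, h2, k + 1, by rw [Nat.mul_add, Nat.mul_one, ← hk]; omega⟩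
      · rintro ⟨h1, h2, k, hk⟩
        have hk1 : 1 ≤ k := by
          rcases Nat.eq_zero_or_pos k with h0 | h0
          · exfalso; rw [h0, Nat.mul_zero] at hk; omega
          · omega
        have hsk : step ≤ step * k := Nat.le_mul_of_pos_right step (by omega)
        refine ⟨by omega, h2, k - 1, ?_⟩
        have : step * (k - 1) = step * k - step := by
          rw [Nat.mul_sub, Nat.mul_one]
        omega
  · intro bs start h i
    rw [pvMarkStep, dif_neg h]
    have : ¬ (start ≤ i ∧ i < bs.length ∧ step ∣ (i - start)) := by
      rintro ⟨h1, h2, -⟩; exact h ⟨by omega, hstep⟩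
    rw [if_neg this]

theorem pvMarkStep_length (step : Nat) (bs : List Bool) (start : Nat) :
    (pvMarkStep bs start step).length = bs.length := by
  refine pvMarkStep.induct step
    (motive := fun bs start => (pvMarkStep bs start step).length = bs.length) ?_ ?_ bs start
  · intro bs start h ih
    rw [pvMarkStep, dif_pos h, ih]; simp
  · intro bs start h
    rw [pvMarkStep, dif_neg h]

-- when the loop counter has passed √M, the invariant's bounded condition is primality
theorem pv_exit (M p i : Nat) (hi : i ≤ M) (hpp : M < p * p) :
    decide (2 ≤ i ∧ ∀ q, q < p → 2 ≤ q → ¬ (q ∣ i ∧ q * q ≤ i)) = decide (Nat.Prime i) := by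
  rw [decide_eq_decide]
  constructor
  · rintro ⟨h2, hall⟩
    rw [pv_prime_iff_sqrt i h2]
    intro q h2q hqq hdvd
    have hqp : q < p := by
      by_contra hge
      simp only [not_lt] at hge
      have := Nat.mul_le_mul hge hge
      omega
    exact hall q hqp h2q ⟨hdvd, hqq⟩
  · intro hpr
    refine ⟨hpr.two_le, fun q hq h2q hc => ?_⟩
    exact (pv_prime_iff_sqrt i hpr.two_le).mp hpr q h2q hc.2 hc.1

-- the invariant at index p itself reads as primality of p
theorem pv_self_iff (p : Nat) (h2 : 2 ≤ p) :
    (2 ≤ p ∧ ∀ q, q < p → 2 ≤ q → ¬ (q ∣ p ∧ q * q ≤ p)) ↔ Nat.Prime p := by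
  constructor
  · rintro ⟨-, hall⟩
    rw [pv_prime_iff_sqrt p h2]
    intro q h2q hqq hdvd
    have hle : q ≤ p := Nat.le_of_dvd (by omega) hdvd
    have hne : q ≠ p := by
      rintro rfl
      have hx : q * q ≤ q * 1 := by omega
      have := Nat.le_of_mul_le_mul_left hx (by omega : 0 < q)
      omega
    exact hall q (by omega) h2q ⟨hdvd, hqq⟩
  · intro hpr
    refine ⟨h2, fun q hq h2q hc => ?_⟩
    rcases (Nat.Prime.eq_one_or_self_of_dvd hpr q hc.1) with h | h <;> omega

-- a composite p with p ∣ i and p*p ≤ i yields a smaller witness (its least prime factor)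
theorem pv_composite (p i : Nat) (h2 : 2 ≤ p) (hnp : ¬ Nat.Prime p)
    (hdvd : p ∣ i) (hpp : p * p ≤ i) :
    ∃ q, q < p ∧ 2 ≤ q ∧ q ∣ i ∧ q * q ≤ i := by
  have hqp : p.minFac ∣ p := Nat.minFac_dvd p
  have hprq : Nat.Prime p.minFac := Nat.minFac_prime (by omega)
  have hsq : p.minFac * p.minFac ≤ p := by
    have h := Nat.minFac_sq_le_self (by omega) hnp
    rwa [Nat.pow_two] at h
  have hle : p.minFac ≤ p := Nat.le_of_dvd (by omega) hqp
  have hne : p.minFac ≠ p := fun he => hnp (he ▸ hprq)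
  have hpl : p ≤ p * p := Nat.le_mul_of_pos_left p (by omega)
  exact ⟨p.minFac, by omega, hprq.two_le, hqp.trans hdvd, by omega⟩

theorem pvSieve_correct (M : Nat) (hM : 2 ≤ M) (p : Nat) (bs : List Bool)
    (hp : 2 ≤ p) (hlen : bs.length = M + 1)
    (hinv : ∀ i, i ≤ M → bs.getD i false =
      decide (2 ≤ i ∧ ∀ q, q < p → 2 ≤ q → ¬ (q ∣ i ∧ q * q ≤ i))) :
    ∀ i, i ≤ M → (pvSieveLoop bs p M).getD i false = decide (Nat.Prime i) := by
  suffices H : ∀ fuel p bs, M + 1 - p ≤ fuel → 2 ≤ p → bs.length = M + 1 →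
      (∀ i, i ≤ M → bs.getD i false =
        decide (2 ≤ i ∧ ∀ q, q < p → 2 ≤ q → ¬ (q ∣ i ∧ q * q ≤ i))) →
      ∀ i, i ≤ M → (pvSieveLoop bs p M).getD i false = decide (Nat.Prime i) by
    exact H (M + 1 - p) p bs le_rfl hp hlen hinv
  intro fuel
  induction fuel with
  | zero =>
    intro p bs hf hp hlen hinv i hi
    have hple : p ≤ p * p := Nat.le_mul_of_pos_left p (by omega)
    have hpp : ¬ p * p ≤ M := by omega
    rw [pvSieveLoop, dif_neg hpp, hinv i hi]
    exact pv_exit M p i hi (by omega)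
  | succ fuel ih =>
    intro p bs hf hp hlen hinv i hi
    by_cases hpp : p * p ≤ M
    · have hple : p ≤ p * p := Nat.le_mul_of_pos_left p (by omega)
      have hpM : p ≤ M := by omega
      have hbp : bs.getD p false = decide (Nat.Prime p) := by
        rw [hinv p hpM, decide_eq_decide]
        exact pv_self_iff p hp
      rw [pvSieveLoop, dif_pos hpp, hbp]
      by_cases hprime : Nat.Prime p
      · rw [if_pos (by simp [hprime])]
        refine ih (p + 1) (pvMarkStep bs (p * p) p) (by omega) (by omega)
          (by rw [pvMarkStep_length, hlen]) ?_ i hi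
        intro j hj
        rw [pvMarkStep_getD p (by omega) bs (p * p) j, hlen]
        by_cases hC : p * p ≤ j ∧ j < M + 1 ∧ p ∣ (j - p * p)
        · rw [if_pos hC]
          have hpj : p ∣ j := by
            have h1 : p ∣ p * p := dvd_mul_left p p
            have h2 := Nat.dvd_add hC.2.2 h1
            rwa [Nat.sub_add_cancel hC.1] at h2
          symm
          rw [decide_eq_false_iff_not]
          rintro ⟨h2j, hall⟩
          exact hall p (Nat.lt_succ_self p) hp ⟨hpj, hC.1⟩
        · rw [if_neg hC, hinv j hj, decide_eq_decide]
          constructor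
          · rintro ⟨h2j, hall⟩
            refine ⟨h2j, fun q hq h2q hc => ?_⟩
            rcases Nat.lt_succ_iff_lt_or_eq.mp hq with hlt | rfl
            · exact hall q hlt h2q hc
            · exact hC ⟨hc.2, by omega, Nat.dvd_sub hc.1 (dvd_mul_left q q)⟩
          · rintro ⟨h2j, hall⟩
            exact ⟨h2j, fun q hq h2q hc => hall q (by omega) h2q hc⟩
      · rw [if_neg (by simp [hprime])]
        refine ih (p + 1) bs (by omega) (by omega) hlen ?_ i hi
        intro j hj
        rw [hinv j hj, decide_eq_decide]
        constructor
        · rintro ⟨h2j, hall⟩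
          refine ⟨h2j, fun q hq h2q hc => ?_⟩
          rcases Nat.lt_succ_iff_lt_or_eq.mp hq with hlt | rfl
          · exact hall q hlt h2q hc
          · obtain ⟨r, hr1, hr2, hr3, hr4⟩ := pv_composite q j h2q hprime hc.1 hc.2
            exact hall r hr1 hr2 ⟨hr3, hr4⟩
        · rintro ⟨h2j, hall⟩
          exact ⟨h2j, fun q hq h2q hc => hall q (by omega) h2q hc⟩
    · rw [pvSieveLoop, dif_neg hpp, hinv i hi]
      have hple : p ≤ p * p := Nat.le_mul_of_pos_left p (by omega)
      exact pv_exit M p i hi (by omega)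

theorem pvPi_succ (j : Nat) :
    pvPi (j + 1) = pvPi j + if Nat.Prime (j + 1) then 1 else 0 := by
  unfold pvPi
  rw [List.range_succ, List.countP_append]
  simp

-- the initial array satisfies the sieve invariant at p = 2
theorem pv_init (M : Nat) (hM : 2 ≤ M) (p : Nat) (hp : p = 2) (i : Nat) (hi : i ≤ M) :
    (((List.replicate (M + 1) true).set 0 false).set 1 false).getD i false =
      decide (2 ≤ i ∧ ∀ q, q < p → 2 ≤ q → ¬ (q ∣ i ∧ q * q ≤ i)) := by
  rcases i with _ | _ | j
  · rw [decide_eq_false (fun h => absurd h.1 (by omega))]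
    have h0 : 0 < M + 1 := by omega
    simp [List.getD_eq_getElem?_getD, List.getElem?_set, List.getElem?_replicate, h0]
  · rw [decide_eq_false (fun h => absurd h.1 (by omega))]
    have h0 : 1 < M + 1 := by omega
    simp [List.getD_eq_getElem?_getD, List.getElem?_set, List.getElem?_replicate, h0]
  · rw [decide_eq_true (⟨by omega, fun q hq h2q => absurd hq (by omega)⟩ :
      2 ≤ j + 2 ∧ ∀ q, q < p → 2 ≤ q → ¬ (q ∣ (j + 2) ∧ q * q ≤ j + 2))]
    have hlt : j + 2 < M + 1 := by omega
    simp [List.getD_eq_getElem?_getD, List.getElem?_set, List.getElem?_replicate, hlt]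

-- B's count-building fold
theorem pv_foldB (n : Nat) :
    ((List.range' 2 n).foldl
        (fun (st : Nat × List Nat) i =>
          let c := if pvTrial i then st.1 + 1 else st.1
          (c, st.2 ++ [c]))
        (0, [0, 0])) = (pvPi (n + 1), (List.range (n + 2)).map pvPi) := by
  induction n with
  | zero => decide
  | succ n ihn =>
    have hcat : List.range' 2 (n + 1) = List.range' 2 n ++ [2 + n] := by
      have h := List.range'_concat (step := 1) (s := 2) (n := n)
      simpa using h
    rw [hcat, List.foldl_append, ihn]
    have h1 : 2 + n = n + 2 := by omega
    have htr : pvTrial (2 + n) = decide (Nat.Prime (n + 2)) := by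
      rw [h1, pvTrial_eq (n + 2) (by omega)]
    simp only [List.foldl_cons, List.foldl_nil, htr]
    have hc : (if decide (Nat.Prime (n + 2)) = true then pvPi (n + 1) + 1 else pvPi (n + 1)) = pvPi (n + 2) := by
      rw [pvPi_succ (n + 1)]
      by_cases hp : Nat.Prime (n + 2) <;> simp [hp]
    simp only [hc]
    simp [List.range_succ]

-- A's prefix-count fold, for any flag list that already reads as primality
theorem pv_foldA (M : Nat) (hM : 2 ≤ M) (bs : List Bool)
    (hbs : ∀ i, i ≤ M → bs.getD i false = decide (Nat.Prime i)) :
    ∀ n, n ≤ M - 1 →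
    ((List.range' 2 n).foldl
        (fun (st : Nat × List Nat) i =>
          let running := if bs.getD i false then st.1 + 1 else st.1
          (running, st.2.set i running))
        (0, List.replicate (M + 1) 0)) =
      (pvPi (n + 1), (List.range (n + 2)).map pvPi ++ List.replicate (M - 1 - n) 0) := by
  intro n
  induction n with
  | zero =>
    intro _
    have hrep : List.replicate (M + 1) (0 : Nat) = [0, 0] ++ List.replicate (M - 1) 0 := by
      have h : M + 1 = 2 + (M - 1) := by omega
      rw [h, List.replicate_add]
      rfl
    have hpi : pvPi 1 = 0 := by decide
    have hmap : (List.range 2).map pvPi = [0, 0] := by decide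
    rw [show List.range' 2 0 = ([] : List Nat) from rfl, List.foldl_nil, hrep, hpi, hmap]
    simp
  | succ n ihn =>
    intro hn
    have hcat : List.range' 2 (n + 1) = List.range' 2 n ++ [2 + n] := by
      have h := List.range'_concat (step := 1) (s := 2) (n := n)
      simpa using h
    rw [hcat, List.foldl_append, ihn (by omega)]
    have h1 : 2 + n = n + 2 := by omega
    have hget : bs.getD (2 + n) false = decide (Nat.Prime (n + 2)) := by
      rw [h1]; exact hbs (n + 2) (by omega)
    simp only [List.foldl_cons, List.foldl_nil, hget]
    have hc : (if decide (Nat.Prime (n + 2)) = true then pvPi (n + 1) + 1 else pvPi (n + 1)) = pvPi (n + 2) := by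
      rw [pvPi_succ (n + 1)]
      by_cases hp : Nat.Prime (n + 2) <;> simp [hp]
    simp only [hc]
    have hlen : ((List.range (n + 2)).map pvPi).length = n + 2 := by simp
    have hset : ((List.range (n + 2)).map pvPi ++ List.replicate (M - 1 - n) 0).set (2 + n) (pvPi (n + 2)) =
        (List.range (n + 3)).map pvPi ++ List.replicate (M - 1 - (n + 1)) 0 := by
      rw [List.set_append]
      rw [if_neg (by omega)]
      have hrep : List.replicate (M - 1 - n) (0 : Nat) = 0 :: List.replicate (M - 1 - (n + 1)) 0 := by
        have h : M - 1 - n = (M - 1 - (n + 1)) + 1 := by omega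
        rw [h, List.replicate_succ]
      rw [hrep]
      have hidx : 2 + n - ((List.range (n + 2)).map pvPi).length = 0 := by omega
      rw [hidx, List.set_cons_zero]
      simp [List.range_succ]
    rw [hset]

theorem pv_lists_eq (M : Nat) (hM : 2 ≤ M) :
    (((List.range' 2 (M - 1)).foldl
        (fun (st : Nat × List Nat) i =>
          let running := if (pvSieveLoop (((List.replicate (M + 1) true).set 0 false).set 1 false) 2 M).getD i false then st.1 + 1 else st.1
          (running, st.2.set i running))
        (0, List.replicate (M + 1) 0)).2 : List Nat) =
    (((List.range' 2 (M - 1)).foldl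
        (fun (st : Nat × List Nat) i =>
          let c := if pvTrial i then st.1 + 1 else st.1
          (c, st.2 ++ [c]))
        (0, [0, 0])).2 : List Nat) := by
  have hbs : ∀ i, i ≤ M →
      (pvSieveLoop (((List.replicate (M + 1) true).set 0 false).set 1 false) 2 M).getD i false =
        decide (Nat.Prime i) :=
    pvSieve_correct M hM 2 _ (le_refl 2) (by simp) (pv_init M hM 2 rfl)
  rw [pv_foldA M hM _ hbs (M - 1) (le_refl _), pv_foldB (M - 1)]
  simp

-- A's tally fold
theorem pv_tally_fold (f : Int → Nat) (l : List Int) (a b : Nat) :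
    l.foldl (fun (mb : Nat × Nat) n =>
        if f n % 2 = 1 then (mb.1 + 1, mb.2) else (mb.1, mb.2 + 1)) (a, b) =
      (a + l.countP (fun n => f n % 2 = 1), b + l.countP (fun n => f n % 2 = 0)) := by
  induction l generalizing a b with
  | nil => simp
  | cons h t ih =>
    have h2 : f h % 2 = 0 ∨ f h % 2 = 1 := by omega
    rcases h2 with hh | hh <;>
      simp only [List.foldl_cons, List.countP_cons, hh, ih] <;> simp <;> omega

-- B's parity sum
theorem pv_sum_fold (f : Int → Nat) (l : List Int) (s : Nat) :
    l.foldl (fun s n => s + f n % 2) s = s + l.countP (fun n => f n % 2 = 1) := by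
  induction l generalizing s with
  | nil => simp
  | cons h t ih =>
    have : f h % 2 = 0 ∨ f h % 2 = 1 := by omega
    rcases this with hh | hh <;> simp [hh, ih, List.countP_cons] <;> omega

-- A's running max equals Python's max clamped below by 0
theorem pv_max_eq (l : List Int) :
    l.foldl (fun m n => if n > m then n else m) 0 = l.foldl max 0 := by
  suffices h : ∀ m : Int, l.foldl (fun m n => if n > m then n else m) m = l.foldl max m from h 0
  induction l with
  | nil => intro m; rfl
  | cons a t ih =>
    intro m
    have : (if a > m then a else m) = max m a := by rw [max_def]; split <;> split <;> omega
    simp only [List.foldl_cons, this, ih]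

theorem pv_foldmax (c a : Int) (t : List Int) :
    t.foldl max (max c a) = max c (t.foldl max a) := by
  induction t generalizing a with
  | nil => rfl
  | cons b t ih => simp only [List.foldl_cons, max_assoc, ih]

theorem pv_maxopt (f : Option Int → Int → Option Int) (l : List Int) (m : Int)
    (hf : ∀ mm x, f (some mm) x = some (max mm x)) :
    List.foldl f (some m) l = some (l.foldl max m) := by
  induction l generalizing m with
  | nil => rfl
  | cons a t ih =>
    simp only [List.foldl_cons, hf, ih]

theorem pv_maxD_eq (l : List Int) :
    l.foldl max 0 = max 0 (PySem.List.maxD l id 0) := by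
  cases l with
  | nil => rfl
  | cons h t =>
    simp only [PySem.List.maxD, PySem.List.max?, List.foldl_cons]
    rw [pv_maxopt _ t h (fun mm x => by
      by_cases hc : mm < x <;> simp [max_def, hc] <;> omega), pv_foldmax 0 h t]
    rfl

-- tallying by two counters and comparing equals summing parities and doubling
theorem pv_branch (L : List Nat) (rounds : List Int) :
    (let t := rounds.foldl
       (fun (mb : Nat × Nat) n =>
         if PySem.List.pyGetD L n 0 % 2 = 1 then (mb.1 + 1, mb.2) else (mb.1, mb.2 + 1)) (0, 0)
     if t.1 > t.2 then some "Maria" else if t.2 > t.1 then some "Ben" else none) =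
    (let maria := rounds.foldl (fun s n => s + PySem.List.pyGetD L n 0 % 2) 0
     if 2 * maria > rounds.length then some "Maria"
     else if 2 * maria < rounds.length then some "Ben" else none) := by
  rw [pv_tally_fold (fun n => PySem.List.pyGetD L n 0) rounds 0 0]
  rw [pv_sum_fold (fun n => PySem.List.pyGetD L n 0) rounds 0]
  have hlen := List.length_eq_countP_add_countP
    (fun n => decide (PySem.List.pyGetD L n 0 % 2 = 1)) (l := rounds)
  have hQ : rounds.countP (fun a => decide ¬(decide (PySem.List.pyGetD L a 0 % 2 = 1) = true)) =
      rounds.countP (fun n => decide (PySem.List.pyGetD L n 0 % 2 = 0)) := by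
    apply List.countP_congr
    intro a _
    have h01 : PySem.List.pyGetD L a 0 % 2 = 0 ∨ PySem.List.pyGetD L a 0 % 2 = 1 := by omega
    rcases h01 with h | h <;> simp [h]
  rw [hQ] at hlen
  simp only [Nat.zero_add]
  split_ifs <;> first | rfl | omega

-- the main (max_n ≥ 2) branch of both ports produces the same output
theorem pv_main (rounds : List Int) (M : Nat) (hM : 2 ≤ M) :
    (let bs := pvSieveLoop (((List.replicate (M + 1) true).set 0 false).set 1 false) 2 M
     let pc := ((List.range' 2 (M - 1)).foldl
       (fun (st : Nat × List Nat) i =>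
         let running := if bs.getD i false then st.1 + 1 else st.1
         (running, st.2.set i running)) (0, List.replicate (M + 1) 0)).2
     let t := rounds.foldl
       (fun (mb : Nat × Nat) n =>
         if PySem.List.pyGetD pc n 0 % 2 = 1 then (mb.1 + 1, mb.2) else (mb.1, mb.2 + 1)) (0, 0)
     if t.1 > t.2 then some "Maria" else if t.2 > t.1 then some "Ben" else none) =
    (let count := ((List.range' 2 (M - 1)).foldl
       (fun (st : Nat × List Nat) i =>
         let c := if pvTrial i then st.1 + 1 else st.1
         (c, st.2 ++ [c])) (0, [0, 0])).2
     let maria := rounds.foldl (fun s n => s + PySem.List.pyGetD count n 0 % 2) 0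
     if 2 * maria > rounds.length then some "Maria"
     else if 2 * maria < rounds.length then some "Ben" else none) := by
  simp only [pv_lists_eq M hM]
  exact pv_branch _ rounds

-- ===== VERDICT (by name: the statement is the Claim_ definition above) =====
theorem isWinner_spec : Claim_equal_isWinner := by
  unfold Claim_equal_isWinner
  intro x nums _ _
  unfold Spec_isWinner isWinner isWinner_alt
  by_cases h0 : x = 0 ∨ nums = []
  · rw [if_pos h0, if_pos h0]
  · rw [if_neg h0, if_neg h0]
    simp only [pv_max_eq, pv_maxD_eq]
    generalize PySem.List.maxD (PySem.List.slice nums none (some x)) id 0 = B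
    generalize PySem.List.slice nums none (some x) = rounds
    by_cases hB2 : B < 2
    · rw [if_pos (max_lt_iff.mpr ⟨by norm_num, hB2⟩), if_pos hB2]
      cases rounds with
      | nil => simp
      | cons a t => simp
    · rw [if_neg (fun hcon => hB2 (lt_of_le_of_lt (le_max_right 0 B) hcon)), if_neg hB2]
      have hBe : max 0 B = B := max_eq_right (by omega)
      rw [hBe]
      exact pv_main rounds B.toNat (by omega)
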